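-- pv_equiv track=rewrite | github.com/AdamZhouSE/pythonHomework | Code/CodeRecords/2566/60764/245800.py | evalHP
-- ===== SOURCE A (Python) =====
-- def evalHP(hp,undercity,x,y):
--     if x==len(undercity[0])-1 and y==len(undercity)-1:
--         return True
--     check1=False
--     check2=False
--     if x+1<len(undercity[0]):
--         if hp+undercity[y][x+1]>0:
--             check1=evalHP(hp+undercity[y][x+1],undercity,x+1,y)
--     if y+1<len(undercity):
--         if hp+undercity[y+1][x]>0:
--             check2=evalHP(hp+undercity[y+1][x],undercity,x,y+1)
--     if check1==False and check2==False:
--         return False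
--     return True
--
-- undercity=[]
--
-- hp=0
-- ===== SOURCE B (Python) =====
-- def evalHP(hp, undercity, x, y):
--     h = len(undercity)
--     w = len(undercity[0])
--     # forward DP: best achievable hp on arrival at each cell (None = unreachable)
--     best = {(y, x): hp}
--     for j in range(y, h):
--         for i in range(x, w):
--             if j == y and i == x:
--                 continue
--             cand = None
--             for (pj, pi) in ((j, i - 1), (j - 1, i)):
--                 if pj >= y and pi >= x and (pj, pi) in best:
--                     v = best[(pj, pi)] + undercity[j][i]
--                     if v > 0 and (cand is None or cand < v):
--                         cand = v
--             if cand is not None: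
--                 best[(j, i)] = cand
--     return (h - 1, w - 1) in best
-- ===== Notes on version B (the rewrite author's own statement) =====
-- stated objective: alternative
-- what changed: Replaced A's branching recursion over all right/down paths by a single row-major dynamic-programming pass over a dict that stores, per cell, the maximum hp with which the cell can be reached (feasibility is monotone in hp), answering from the target cell's entry.
-- outside the precondition, e.g. on evalHP(1, [[1, -5], [-9]], 0, 0): A returns False, B returns False; on evalHP(1, [[1, 2], [3, 4, 5]], 2, 0): A returns False, B returns False
import Mathlib
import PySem

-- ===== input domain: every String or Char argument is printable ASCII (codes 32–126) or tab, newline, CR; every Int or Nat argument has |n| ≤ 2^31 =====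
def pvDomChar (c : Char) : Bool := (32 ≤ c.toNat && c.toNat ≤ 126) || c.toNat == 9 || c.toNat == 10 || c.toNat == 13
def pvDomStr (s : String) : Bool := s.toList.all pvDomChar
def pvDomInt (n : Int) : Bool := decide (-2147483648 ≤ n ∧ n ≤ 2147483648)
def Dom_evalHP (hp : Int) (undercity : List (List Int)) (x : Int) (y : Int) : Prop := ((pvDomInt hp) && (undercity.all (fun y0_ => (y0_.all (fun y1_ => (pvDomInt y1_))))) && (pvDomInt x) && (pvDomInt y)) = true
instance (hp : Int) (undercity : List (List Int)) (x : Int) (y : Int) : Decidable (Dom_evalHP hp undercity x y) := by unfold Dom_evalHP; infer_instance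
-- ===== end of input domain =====

-- B replaces A's branching path recursion by a row-major DP storing the maximum reachable
-- hp per cell (feasibility is monotone in hp); a different algorithm, same result on Pre_.


-- ===== PORT A =====
def evalHP (hp : Int) (undercity : List (List Int)) (x : Int) (y : Int) : Bool :=
  if x = ((PySem.List.pyGetD undercity 0 []).length : Int) - 1 ∧ y = (undercity.length : Int) - 1 then
    true
  else
    let check1 : Bool :=
      if _h1 : x + 1 < ((PySem.List.pyGetD undercity 0 []).length : Int) then
        if hp + PySem.List.pyGetD (PySem.List.pyGetD undercity y []) (x + 1) 0 > 0 then
          evalHP (hp + PySem.List.pyGetD (PySem.List.pyGetD undercity y []) (x + 1) 0) undercity (x + 1) y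
        else false
      else false
    let check2 : Bool :=
      if _h2 : y + 1 < (undercity.length : Int) then
        if hp + PySem.List.pyGetD (PySem.List.pyGetD undercity (y + 1) []) x 0 > 0 then
          evalHP (hp + PySem.List.pyGetD (PySem.List.pyGetD undercity (y + 1) []) x 0) undercity x (y + 1)
        else false
      else false
    if check1 = false ∧ check2 = false then false else true
termination_by ((((PySem.List.pyGetD undercity 0 []).length : Int) - x).toNat + ((undercity.length : Int) - y).toNat)
decreasing_by
  · omega
  · omega

-- ===== PORT B =====
def evalHP_alt (hp : Int) (undercity : List (List Int)) (x : Int) (y : Int) : Bool :=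
  let h : Int := undercity.length
  let w : Int := (PySem.List.pyGetD undercity 0 []).length
  let best : PySem.Dict (Int × Int) Int :=
    (PySem.List.pyRange y h 1).foldl (fun best j =>
      (PySem.List.pyRange x w 1).foldl (fun best i =>
        if j = y ∧ i = x then best
        else
          let cand : Option Int :=
            [(j, i - 1), (j - 1, i)].foldl (fun cand p =>
              if y ≤ p.1 ∧ x ≤ p.2 ∧ best.contains p then
                let v := best.getD p 0 + PySem.List.pyGetD (PySem.List.pyGetD undercity j []) i 0
                if 0 < v ∧ (cand.isNone ∨ cand.getD 0 < v) then some v else cand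
              else cand) none
          match cand with
          | some v => best.insert (j, i) v
          | none => best) best) (PySem.Dict.empty.insert (y, x) hp)
  best.contains (h - 1, w - 1)

-- ===== PRECONDITION & SPEC =====
-- Pre_ admits the inputs on which A provably returns without an IndexError: a nonempty grid
-- whose rows all have at least the first row's length, and a start for which every cell the
-- search can touch is a valid (possibly negative, Python-wraparound) index: either x,y in
-- [-w,w) x [-h,h), or past the grid on the right/bottom edge where A touches no cell at all.
-- It excludes (stated narrowing) ragged grids with a row shorter than the first row — whether
-- A raises there depends on which cells the search reaches, which is not a closed-form
-- condition on the input — and starts further out of range, where A may raise IndexError.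
def Pre_evalHP (hp : Int) (undercity : List (List Int)) (x : Int) (y : Int) : Prop :=
  undercity ≠ [] ∧
  (∀ r ∈ undercity, (undercity.headD []).length ≤ r.length) ∧
  ((-(((undercity.headD []).length : Int)) ≤ x ∧ x < ((undercity.headD []).length : Int) ∧
    -((undercity.length : Int)) ≤ y ∧ y < ((undercity.length : Int))) ∨
   (((undercity.length : Int)) ≤ y ∧ ((undercity.headD []).length : Int) - 1 ≤ x) ∨
   (y = ((undercity.length : Int)) - 1 ∧ ((undercity.headD []).length : Int) ≤ x))
instance (hp : Int) (undercity : List (List Int)) (x : Int) (y : Int) : Decidable (Pre_evalHP hp undercity x y) := by unfold Pre_evalHP; infer_instance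

def pvWitness_evalHP : Int × List (List Int) × Int × Int := (7, [[0, 1], [-2, 3]], 0, 0)

def Spec_evalHP (hp : Int) (undercity : List (List Int)) (x : Int) (y : Int) (out : Bool) : Prop := out = evalHP_alt hp undercity x y
instance (hp : Int) (undercity : List (List Int)) (x : Int) (y : Int) (out : Bool) : Decidable (Spec_evalHP hp undercity x y out) := by unfold Spec_evalHP; infer_instance

-- ===== CLAIM (what is proved, stated in full; the proofs are below) =====
def Claim_equal_evalHP : Prop := ∀ (hp : Int) (undercity : List (List Int)) (x : Int) (y : Int), Dom_evalHP hp undercity x y → Pre_evalHP hp undercity x y → Spec_evalHP hp undercity x y (evalHP hp undercity x y)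

-- ===== LEMMAS AND PROOFS =====

-- width, height, cell access shared by the mathematical layer
def pvW (u : List (List Int)) : Int := ((PySem.List.pyGetD u 0 []).length : Int)
def pvH (u : List (List Int)) : Int := (u.length : Int)
def pvCell (u : List (List Int)) (i j : Int) : Int :=
  PySem.List.pyGetD (PySem.List.pyGetD u j []) i 0

-- one DP step: arrive with hp o, pay cell c, survive only if positive
def pvStep : Option Int → Int → Option Int
  | some v, c => if 0 < v + c then some (v + c) else none
  | none, _ => none

def pvMax : Option Int → Option Int → Option Int
  | none, o => o
  | some a, none => some a
  | some a, some b => some (max a b)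

-- maximum hp with which cell (i val, j val) can be reached from (x, y) starting with hp
def pvG (hp : Int) (u : List (List Int)) (x y i j : Int) : Option Int :=
  if i = x ∧ j = y then some hp
  else if _hb : x ≤ i ∧ i < pvW u ∧ y ≤ j ∧ j < pvH u then
    pvMax (if _h1 : x ≤ i - 1 then pvStep (pvG hp u x y (i - 1) j) (pvCell u i j) else none)
          (if _h2 : y ≤ j - 1 then pvStep (pvG hp u x y i (j - 1)) (pvCell u i j) else none)
  else none
termination_by ((i - x).toNat + (j - y).toNat)
decreasing_by
  · omega
  · omega

-- value/endpoint of following a list of moves (true = right, false = down)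
def pvRun (u : List (List Int)) (v i j : Int) : List Bool → Option (Int × Int × Int)
  | [] => some (v, i, j)
  | d :: ms =>
    if d then
      if i + 1 < pvW u then
        if 0 < v + pvCell u (i + 1) j then pvRun u (v + pvCell u (i + 1) j) (i + 1) j ms else none
      else none
    else
      if j + 1 < pvH u then
        if 0 < v + pvCell u i (j + 1) then pvRun u (v + pvCell u i (j + 1)) i (j + 1) ms else none
      else none

theorem pvRun_append (u : List (List Int)) (v i j : Int) (ms ms' : List Bool) :
    pvRun u v i j (ms ++ ms') =
      (pvRun u v i j ms).bind (fun t => pvRun u t.1 t.2.1 t.2.2 ms') := by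
  induction ms generalizing v i j with
  | nil => simp [pvRun]
  | cons d ms ih =>
    simp only [List.cons_append, pvRun]
    split_ifs <;> simp [ih]

theorem evalHP_target (u : List (List Int)) (v i j : Int) (ht : i = pvW u - 1 ∧ j = pvH u - 1) :
    evalHP v u i j = true := by
  rw [evalHP, if_pos (by simpa [pvW, pvH] using ht)]

theorem evalHP_eq (u : List (List Int)) (v i j : Int) (ht : ¬(i = pvW u - 1 ∧ j = pvH u - 1)) :
    evalHP v u i j =
      ((if i + 1 < pvW u ∧ 0 < v + pvCell u (i + 1) j then
          evalHP (v + pvCell u (i + 1) j) u (i + 1) j else false) ||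
       (if j + 1 < pvH u ∧ 0 < v + pvCell u i (j + 1) then
          evalHP (v + pvCell u i (j + 1)) u i (j + 1) else false)) := by
  rw [evalHP, if_neg (by simpa [pvW, pvH] using ht)]
  simp only [pvW, pvH, pvCell, gt_iff_lt]
  split_ifs <;> simp_all
  rename_i himp h1 h2
  rcases Bool.eq_false_or_eq_true
      (evalHP (v + PySem.List.pyGetD (PySem.List.pyGetD u j []) (i + 1) 0) u (i + 1) j) with he | he
  · exact Or.inl he
  · exact Or.inr (himp he)

theorem pv_T1a (u : List (List Int)) (v i j : Int) (h : evalHP v u i j = true) :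
    ∃ ms f, pvRun u v i j ms = some (f, pvW u - 1, pvH u - 1) := by
  suffices H : ∀ (n : Nat) (v i j : Int), (pvW u - i).toNat + (pvH u - j).toNat ≤ n →
      evalHP v u i j = true → ∃ ms f, pvRun u v i j ms = some (f, pvW u - 1, pvH u - 1) by
    exact H _ v i j le_rfl h
  intro n
  induction n with
  | zero =>
    intro v i j hn h
    by_cases ht : i = pvW u - 1 ∧ j = pvH u - 1
    · omega
    · rw [evalHP_eq u v i j ht] at h
      rw [if_neg (by omega), if_neg (by omega)] at h
      simp at h
  | succ n ih =>
    intro v i j hn h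
    by_cases ht : i = pvW u - 1 ∧ j = pvH u - 1
    · exact ⟨[], v, by simp [pvRun, ht.1, ht.2]⟩
    · rw [evalHP_eq u v i j ht, Bool.or_eq_true] at h
      rcases h with h | h
      · by_cases hg : i + 1 < pvW u ∧ 0 < v + pvCell u (i + 1) j
        · rw [if_pos hg] at h
          obtain ⟨ms, f, hf⟩ := ih _ _ _ (by obtain ⟨hg1, -⟩ := hg; omega) h
          exact ⟨true :: ms, f, by simp [pvRun, hg.1, hg.2, hf]⟩
        · rw [if_neg hg] at h; exact absurd h (by simp)
      · by_cases hg : j + 1 < pvH u ∧ 0 < v + pvCell u i (j + 1)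
        · rw [if_pos hg] at h
          obtain ⟨ms, f, hf⟩ := ih _ _ _ (by obtain ⟨hg1, -⟩ := hg; omega) h
          exact ⟨false :: ms, f, by simp [pvRun, hg.1, hg.2, hf]⟩
        · rw [if_neg hg] at h; exact absurd h (by simp)

theorem pv_T1b (u : List (List Int)) (ms : List Bool) (v i j f : Int)
    (h : pvRun u v i j ms = some (f, pvW u - 1, pvH u - 1)) : evalHP v u i j = true := by
  induction ms generalizing v i j with
  | nil =>
    simp [pvRun] at h
    obtain ⟨-, h2, h3⟩ := h
    exact evalHP_target u v i j ⟨by omega, by omega⟩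
  | cons d ms ih =>
    by_cases ht : i = pvW u - 1 ∧ j = pvH u - 1
    · exact evalHP_target u v i j ht
    · rw [evalHP_eq u v i j ht, Bool.or_eq_true]
      cases d <;> simp only [pvRun, Bool.false_eq_true, if_true, if_false, ite_true, ite_false] at h
      · split_ifs at h with h1 h2
        exact Or.inr (by rw [if_pos ⟨h1, h2⟩]; exact ih _ _ _ h)
      · split_ifs at h with h1 h2
        exact Or.inl (by rw [if_pos ⟨h1, h2⟩]; exact ih _ _ _ h)

theorem pvG_start (hp : Int) (u : List (List Int)) (x y : Int) :
    pvG hp u x y x y = some hp := by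
  rw [pvG]; simp

theorem pvG_eq (hp : Int) (u : List (List Int)) (x y i j : Int)
    (hns : ¬(i = x ∧ j = y)) (hb : x ≤ i ∧ i < pvW u ∧ y ≤ j ∧ j < pvH u) :
    pvG hp u x y i j =
      pvMax (if x ≤ i - 1 then pvStep (pvG hp u x y (i - 1) j) (pvCell u i j) else none)
            (if y ≤ j - 1 then pvStep (pvG hp u x y i (j - 1)) (pvCell u i j) else none) := by
  rw [pvG, if_neg hns, dif_pos hb]
  simp

theorem pvG_none (hp : Int) (u : List (List Int)) (x y i j : Int)
    (hns : ¬(i = x ∧ j = y)) (hb : ¬(x ≤ i ∧ i < pvW u ∧ y ≤ j ∧ j < pvH u)) :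
    pvG hp u x y i j = none := by
  rw [pvG, if_neg hns, dif_neg hb]

theorem pvMax_some (o1 o2 : Option Int) (m : Int) (h : pvMax o1 o2 = some m) :
    o1 = some m ∨ o2 = some m := by
  cases o1 <;> cases o2 <;> simp_all [pvMax]
  rcases max_choice ‹_› ‹_› with hm | hm <;> omega

theorem pvMax_le_left (o1 o2 : Option Int) (a : Int) (h : o1 = some a) :
    ∃ m, pvMax o1 o2 = some m ∧ a ≤ m := by
  cases o2 <;> simp_all [pvMax] <;> omega

theorem pvMax_le_right (o1 o2 : Option Int) (a : Int) (h : o2 = some a) :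
    ∃ m, pvMax o1 o2 = some m ∧ a ≤ m := by
  cases o1 <;> simp_all [pvMax] <;> omega

theorem pv_T2 (hp : Int) (u : List (List Int)) (x y i j m : Int)
    (h : pvG hp u x y i j = some m) : ∃ ms, pvRun u hp x y ms = some (m, i, j) := by
  suffices H : ∀ (n : Nat) (i j m : Int), (i - x).toNat + (j - y).toNat ≤ n →
      pvG hp u x y i j = some m → ∃ ms, pvRun u hp x y ms = some (m, i, j) by
    exact H _ i j m le_rfl h
  intro n
  induction n with
  | zero =>
    intro i j m hn h
    by_cases hs : i = x ∧ j = y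
    · refine ⟨[], ?_⟩
      rw [hs.1, hs.2, pvG_start] at h
      simp [pvRun, hs.1, hs.2, (Option.some_inj.mp h).symm]
    · by_cases hb : x ≤ i ∧ i < pvW u ∧ y ≤ j ∧ j < pvH u
      · omega
      · rw [pvG_none hp u x y i j hs hb] at h; exact absurd h (by simp)
  | succ n ih =>
    intro i j m hn h
    by_cases hs : i = x ∧ j = y
    · refine ⟨[], ?_⟩
      rw [hs.1, hs.2, pvG_start] at h
      simp [pvRun, hs.1, hs.2, (Option.some_inj.mp h).symm]
    · by_cases hb : x ≤ i ∧ i < pvW u ∧ y ≤ j ∧ j < pvH u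
      · rw [pvG_eq hp u x y i j hs hb] at h
        rcases pvMax_some _ _ _ h with h1 | h1
        · by_cases hg : x ≤ i - 1
          · rw [if_pos hg] at h1
            cases hG : pvG hp u x y (i - 1) j with
            | none => rw [hG] at h1; exact absurd h1 (by simp [pvStep])
            | some a =>
              rw [hG] at h1
              simp only [pvStep] at h1
              split_ifs at h1 with hpos
              obtain ⟨ms, hms⟩ := ih (i - 1) j a (by omega) hG
              refine ⟨ms ++ [true], ?_⟩
              rw [pvRun_append, hms]
              simp only [Option.bind_some, pvRun]
              rw [if_pos trivial]
              have : i - 1 + 1 = i := by omega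
              rw [this, if_pos (by omega), if_pos (by omega)]
              simp_all
          · rw [if_neg hg] at h1; exact absurd h1 (by simp)
        · by_cases hg : y ≤ j - 1
          · rw [if_pos hg] at h1
            cases hG : pvG hp u x y i (j - 1) with
            | none => rw [hG] at h1; exact absurd h1 (by simp [pvStep])
            | some a =>
              rw [hG] at h1
              simp only [pvStep] at h1
              split_ifs at h1 with hpos
              obtain ⟨ms, hms⟩ := ih i (j - 1) a (by omega) hG
              refine ⟨ms ++ [false], ?_⟩
              rw [pvRun_append, hms]
              simp only [Option.bind_some, pvRun]
              rw [if_neg (by simp)]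
              have : j - 1 + 1 = j := by omega
              rw [this, if_pos (by omega), if_pos (by omega)]
              simp_all
          · rw [if_neg hg] at h1; exact absurd h1 (by simp)
      · rw [pvG_none hp u x y i j hs hb] at h; exact absurd h (by simp)

theorem pv_T3 (hp : Int) (u : List (List Int)) (x y : Int)
    (hx : x < pvW u) (hy : y < pvH u) (ms : List Bool) (f i j : Int)
    (h : pvRun u hp x y ms = some (f, i, j)) :
    ∃ m, pvG hp u x y i j = some m ∧ f ≤ m ∧ x ≤ i ∧ i < pvW u ∧ y ≤ j ∧ j < pvH u := by
  induction ms using List.reverseRecOn generalizing f i j with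
  | nil =>
    simp [pvRun] at h
    obtain ⟨h1, h2, h3⟩ := h
    subst h1 h2 h3
    exact ⟨hp, pvG_start hp u x y, le_rfl, le_rfl, hx, le_rfl, hy⟩
  | append_singleton ms d ihm =>
    rw [pvRun_append] at h
    cases hr : pvRun u hp x y ms with
    | none => rw [hr] at h; exact absurd h (by simp)
    | some t =>
      obtain ⟨f0, a, b⟩ := t
      rw [hr] at h
      simp only [Option.bind_some] at h
      obtain ⟨m0, hG0, hle0, hxa, haw, hyb, hbh⟩ := ihm f0 a b hr
      cases d <;> simp only [pvRun, Bool.false_eq_true, if_true, if_false] at h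
      · -- down move
        split_ifs at h with h1 h2
        simp only [pvRun, Option.some_inj, Prod.mk.injEq] at h
        obtain ⟨hf, hi, hj⟩ := h
        subst hi; subst hj; subst hf
        have hns : ¬(a = x ∧ b + 1 = y) := by rintro ⟨-, hh⟩; omega
        rw [pvG_eq hp u x y a (b + 1) hns ⟨hxa, haw, by omega, h1⟩]
        have ho2 : (if y ≤ b + 1 - 1 then
            pvStep (pvG hp u x y a (b + 1 - 1)) (pvCell u a (b + 1)) else none) =
            some (m0 + pvCell u a (b + 1)) := by
          rw [if_pos (by omega), show b + 1 - 1 = b by omega, hG0]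
          simp only [pvStep]
          rw [if_pos (by omega)]
        obtain ⟨m, hm, hle⟩ := pvMax_le_right _ _ _ ho2
        exact ⟨m, hm, by omega, hxa, haw, by omega, h1⟩
      · -- right move
        split_ifs at h with h1 h2
        simp only [pvRun, Option.some_inj, Prod.mk.injEq] at h
        obtain ⟨hf, hi, hj⟩ := h
        subst hi; subst hj; subst hf
        have hns : ¬(a + 1 = x ∧ b = y) := by rintro ⟨hh, -⟩; omega
        rw [pvG_eq hp u x y (a + 1) b hns ⟨by omega, h1, hyb, hbh⟩]
        have ho1 : (if x ≤ a + 1 - 1 then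
            pvStep (pvG hp u x y (a + 1 - 1) b) (pvCell u (a + 1) b) else none) =
            some (m0 + pvCell u (a + 1) b) := by
          rw [if_pos (by omega), show a + 1 - 1 = a by omega, hG0]
          simp only [pvStep]
          rw [if_pos (by omega)]
        obtain ⟨m, hm, hle⟩ := pvMax_le_left _ _ _ ho1
        exact ⟨m, hm, by omega, by omega, h1, hyb, hbh⟩

-- A computes reachability of the target
theorem pv_A_char (hp : Int) (u : List (List Int)) (x y : Int)
    (hxw : x < pvW u) (hyh : y < pvH u) :
    evalHP hp u x y = (pvG hp u x y (pvW u - 1) (pvH u - 1)).isSome := by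
  cases hA : evalHP hp u x y with
  | true =>
    obtain ⟨ms, f, hf⟩ := pv_T1a u hp x y hA
    obtain ⟨m, hm, -⟩ := pv_T3 hp u x y hxw hyh ms f _ _ hf
    simp [hm]
  | false =>
    cases hG : pvG hp u x y (pvW u - 1) (pvH u - 1) with
    | none => simp
    | some m =>
      obtain ⟨ms, hms⟩ := pv_T2 hp u x y _ _ m hG
      have hT := pv_T1b u ms hp x y m hms
      rw [hA] at hT
      exact absurd hT (by simp)

-- B-side invariant machinery
def pvProc (x y w h I J : Int) (p : Int × Int) : Prop :=
  p = (y, x) ∨ (x ≤ p.2 ∧ p.2 < w ∧ y ≤ p.1 ∧ p.1 < h ∧ (p.1 < J ∨ (p.1 = J ∧ p.2 < I)))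

def pvInv (hp : Int) (u : List (List Int)) (x y J I : Int)
    (d : PySem.Dict (Int × Int) Int) : Prop :=
  (∀ p : Int × Int, pvProc x y (pvW u) (pvH u) I J p → d.get? p = pvG hp u x y p.2 p.1) ∧
  (∀ p : Int × Int, ¬ pvProc x y (pvW u) (pvH u) I J p → d.get? p = none)

def pvBody (u : List (List Int)) (x y J : Int) (d : PySem.Dict (Int × Int) Int)
    (I : Int) : PySem.Dict (Int × Int) Int :=
  if J = y ∧ I = x then d
  else
    let cand : Option Int :=
      [(J, I - 1), (J - 1, I)].foldl (fun cand p =>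
        if y ≤ p.1 ∧ x ≤ p.2 ∧ d.contains p then
          let v := d.getD p 0 + PySem.List.pyGetD (PySem.List.pyGetD u J []) I 0
          if 0 < v ∧ (cand.isNone ∨ cand.getD 0 < v) then some v else cand
        else cand) none
    match cand with
    | some v => d.insert (J, I) v
    | none => d

theorem evalHP_alt_eq (hp : Int) (u : List (List Int)) (x y : Int) :
    evalHP_alt hp u x y =
      ((PySem.List.pyRange y (pvH u) 1).foldl
        (fun d J => (PySem.List.pyRange x (pvW u) 1).foldl (pvBody u x y J) d)
        (PySem.Dict.empty.insert (y, x) hp)).contains (pvH u - 1, pvW u - 1) := rfl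

theorem pvInv_congr (hp : Int) (u : List (List Int)) (x y J I J' I' : Int)
    (d : PySem.Dict (Int × Int) Int)
    (hiff : ∀ p : Int × Int, pvProc x y (pvW u) (pvH u) I J p ↔ pvProc x y (pvW u) (pvH u) I' J' p)
    (h : pvInv hp u x y J I d) : pvInv hp u x y J' I' d :=
  ⟨fun p hp' => h.1 p ((hiff p).mpr hp'), fun p hp' => h.2 p (fun hc => hp' ((hiff p).mp hc))⟩

def pvUpd (d : PySem.Dict (Int × Int) Int) (J I : Int) : Option Int → PySem.Dict (Int × Int) Int
  | some v => d.insert (J, I) v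
  | none => d

theorem pv_insert_inv (hp : Int) (u : List (List Int)) (x y J I : Int)
    (d : PySem.Dict (Int × Int) Int)
    (hI : x ≤ I) (hIw : I < pvW u) (hJ : y ≤ J) (hJh : J < pvH u)
    (hns : ¬(J = y ∧ I = x)) (hInv : pvInv hp u x y J I d)
    (o : Option Int) (ho : pvG hp u x y I J = o) :
    pvInv hp u x y J (I + 1) (pvUpd d J I o) := by
  constructor <;> rintro ⟨pj, pi⟩ hpp
  · by_cases hpJI : ((pj : Int), (pi : Int)) = ((J : Int), (I : Int))
    · obtain ⟨e1, e2⟩ := Prod.mk.injEq .. ▸ hpJI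
      subst e1; subst e2
      cases o with
      | some v =>
        simp only [pvUpd]
        rw [PySem.Dict.get?_insert_self, ← ho]
      | none =>
        simp only [pvUpd]
        rw [hInv.2 (pj, pi) ?_, ← ho]
        intro hc
        unfold pvProc at hc
        simp only [Prod.mk.injEq] at hc
        omega
    · have hpp' : pvProc x y (pvW u) (pvH u) I J (pj, pi) := by
        unfold pvProc at hpp ⊢
        simp only [Prod.mk.injEq] at hpp hpJI ⊢
        omega
      cases o with
      | some v =>
        simp only [pvUpd]
        rw [PySem.Dict.get?_insert_of_ne (hne := hpJI)]
        exact hInv.1 _ hpp'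
      | none => exact hInv.1 _ hpp'
  · have hne : ((pj : Int), (pi : Int)) ≠ ((J : Int), (I : Int)) := by
      intro he
      apply hpp
      rw [he]
      exact Or.inr ⟨hI, hIw, hJ, hJh, Or.inr ⟨rfl, by omega⟩⟩
    have hnp : ¬ pvProc x y (pvW u) (pvH u) I J (pj, pi) := by
      intro hc
      apply hpp
      unfold pvProc at hc ⊢
      simp only [Prod.mk.injEq] at hc ⊢
      omega
    cases o with
    | some v =>
      simp only [pvUpd]
      rw [PySem.Dict.get?_insert_of_ne (hne := hne)]
      exact hInv.2 _ hnp
    | none => exact hInv.2 _ hnp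

theorem pv_step (hp : Int) (u : List (List Int)) (x y J I : Int)
    (d : PySem.Dict (Int × Int) Int)
    (hI : x ≤ I) (hIw : I < pvW u) (hJ : y ≤ J) (hJh : J < pvH u)
    (hInv : pvInv hp u x y J I d) : pvInv hp u x y J (I + 1) (pvBody u x y J d I) := by
  unfold pvBody
  by_cases hstart : J = y ∧ I = x
  · rw [if_pos hstart]
    obtain ⟨hs1, hs2⟩ := hstart
    refine pvInv_congr hp u x y J I J (I + 1) d (fun p => ?_) hInv
    obtain ⟨pj, pi⟩ := p
    unfold pvProc
    simp only [Prod.mk.injEq]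
    constructor <;> intro hh <;> omega
  · rw [if_neg hstart]
    simp only [List.foldl_cons, List.foldl_nil]
    have hget1 : x ≤ I - 1 → d.get? (J, I - 1) = pvG hp u x y (I - 1) J := fun hc =>
      hInv.1 (J, I - 1) (Or.inr ⟨hc, by omega, hJ, hJh, Or.inr ⟨rfl, by omega⟩⟩)
    have hnone1 : ¬ x ≤ I - 1 → d.get? (J, I - 1) = none := fun hc =>
      hInv.2 (J, I - 1) (by
        intro hpc
        unfold pvProc at hpc
        simp only [Prod.mk.injEq] at hpc
        omega)
    have hget2 : y ≤ J - 1 → d.get? (J - 1, I) = pvG hp u x y I (J - 1) := fun hc =>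
      hInv.1 (J - 1, I) (Or.inr ⟨hI, hIw, hc, by omega, Or.inl (by omega)⟩)
    have hnone2 : ¬ y ≤ J - 1 → d.get? (J - 1, I) = none := fun hc =>
      hInv.2 (J - 1, I) (by
        intro hpc
        unfold pvProc at hpc
        simp only [Prod.mk.injEq] at hpc
        omega)
    show pvInv hp u x y J (I + 1) (pvUpd d J I _)
    refine pv_insert_inv hp u x y J I d hI hIw hJ hJh hstart hInv _ ?_
    rw [pvG_eq hp u x y I J (by tauto) ⟨hI, hIw, hJ, hJh⟩]
    have hstep1 :
        (if y ≤ J ∧ x ≤ I - 1 ∧ d.contains (J, I - 1) = true then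
           if 0 < d.getD (J, I - 1) 0 + PySem.List.pyGetD (PySem.List.pyGetD u J []) I 0 ∧
              ((none : Option Int).isNone = true ∨
                (none : Option Int).getD 0 <
                  d.getD (J, I - 1) 0 + PySem.List.pyGetD (PySem.List.pyGetD u J []) I 0) then
             some (d.getD (J, I - 1) 0 + PySem.List.pyGetD (PySem.List.pyGetD u J []) I 0)
           else (none : Option Int)
         else (none : Option Int))
        = (if x ≤ I - 1 then pvStep (pvG hp u x y (I - 1) J) (pvCell u I J) else none) := by
      by_cases h1 : x ≤ I - 1
      · rw [if_pos h1, PySem.Dict.contains_eq_isSome_get?, PySem.Dict.getD_eq_get?_getD,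
          hget1 h1]
        cases hG1 : pvG hp u x y (I - 1) J <;>
          simp [pvStep, pvCell, hJ, h1] <;> split_ifs <;> simp_all
      · rw [if_neg h1, if_neg (by tauto)]
    rw [hstep1]
    generalize (if x ≤ I - 1 then pvStep (pvG hp u x y (I - 1) J) (pvCell u I J) else none) = o1
    by_cases h2 : y ≤ J - 1
    · rw [if_pos h2, PySem.Dict.contains_eq_isSome_get?, PySem.Dict.getD_eq_get?_getD,
        hget2 h2]
      cases hG2 : pvG hp u x y I (J - 1) with
      | none =>
        rw [if_neg (by simp)]
        cases o1 <;> simp [pvMax, pvStep]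
      | some b =>
        rw [if_pos ⟨h2, hI, rfl⟩]
        cases o1 <;>
          simp only [pvStep, pvMax, pvCell, Option.isNone_some, Option.isNone_none,
            Option.getD_some, Option.getD_none, Option.some_inj] <;>
          split_ifs <;>
          simp_all [Int.max_def] <;> omega
    · rw [if_neg h2, if_neg (by tauto)]
      cases o1 <;> simp [pvMax]

theorem pv_inner (hp : Int) (u : List (List Int)) (x y J : Int) :
    ∀ (n : Nat) (I : Int) (d : PySem.Dict (Int × Int) Int), x ≤ I → (pvW u - I).toNat ≤ n →
      y ≤ J → J < pvH u → pvInv hp u x y J I d →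
      pvInv hp u x y J (pvW u) ((PySem.List.pyRange I (pvW u) 1).foldl (pvBody u x y J) d) := by
  intro n
  induction n with
  | zero =>
    intro I d hxI hn hyJ hJh hInv
    rw [show PySem.List.pyRange I (pvW u) 1 = [] from PySem.List.pyRange_one_eq_nil (by omega)]
    simp only [List.foldl_nil]
    refine pvInv_congr hp u x y J I J (pvW u) d (fun p => ?_) hInv
    unfold pvProc
    constructor <;> (rintro (hh | hh) <;> [exact Or.inl hh; exact Or.inr (by omega)])
  | succ n ih =>
    intro I d hxI hn hyJ hJh hInv
    by_cases hIw : I < pvW u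
    · rw [PySem.List.pyRange_one_cons hIw, List.foldl_cons]
      exact ih (I + 1) _ (by omega) (by omega) hyJ hJh
        (pv_step hp u x y J I d hxI hIw hyJ hJh hInv)
    · rw [show PySem.List.pyRange I (pvW u) 1 = [] from PySem.List.pyRange_one_eq_nil (by omega)]
      simp only [List.foldl_nil]
      refine pvInv_congr hp u x y J I J (pvW u) d (fun p => ?_) hInv
      unfold pvProc
      constructor <;> (rintro (hh | hh) <;> [exact Or.inl hh; exact Or.inr (by omega)])

theorem pv_outer (hp : Int) (u : List (List Int)) (x y : Int)
    (hx : x ≤ pvW u) :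
    ∀ (n : Nat) (J : Int) (d : PySem.Dict (Int × Int) Int), y ≤ J → (pvH u - J).toNat ≤ n →
      pvInv hp u x y J x d →
      pvInv hp u x y (pvH u) x
        ((PySem.List.pyRange J (pvH u) 1).foldl
          (fun d J => (PySem.List.pyRange x (pvW u) 1).foldl (pvBody u x y J) d) d) := by
  intro n
  induction n with
  | zero =>
    intro J d hyJ hn hInv
    rw [show PySem.List.pyRange J (pvH u) 1 = [] from PySem.List.pyRange_one_eq_nil (by omega)]
    simp only [List.foldl_nil]
    refine pvInv_congr hp u x y J x (pvH u) x d (fun p => ?_) hInv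
    unfold pvProc
    constructor <;> (rintro (hh | hh) <;> [exact Or.inl hh; exact Or.inr (by omega)])
  | succ n ih =>
    intro J d hyJ hn hInv
    by_cases hJh : J < pvH u
    · rw [PySem.List.pyRange_one_cons hJh, List.foldl_cons]
      refine ih (J + 1) _ (by omega) (by omega) ?_
      refine pvInv_congr hp u x y J (pvW u) (J + 1) x _ (fun p => ?_)
        (pv_inner hp u x y J (pvW u - x).toNat x d le_rfl le_rfl hyJ hJh hInv)
      unfold pvProc
      constructor <;> (rintro (hh | hh) <;> [exact Or.inl hh; exact Or.inr (by omega)])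
    · rw [show PySem.List.pyRange J (pvH u) 1 = [] from PySem.List.pyRange_one_eq_nil (by omega)]
      simp only [List.foldl_nil]
      refine pvInv_congr hp u x y J x (pvH u) x d (fun p => ?_) hInv
      unfold pvProc
      constructor <;> (rintro (hh | hh) <;> [exact Or.inl hh; exact Or.inr (by omega)])

theorem pv_init (hp : Int) (u : List (List Int)) (x y : Int) :
    pvInv hp u x y y x (PySem.Dict.empty.insert (y, x) hp) := by
  constructor <;> intro p hpp
  · have hpe : p = (y, x) := by
      rcases hpp with hh | hh
      · exact hh
      · exfalso; omega
    rw [hpe, PySem.Dict.get?_insert_self]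
    simp [pvG_start]
  · have hpe : ¬ p = (y, x) := fun he => hpp (Or.inl he)
    rw [PySem.Dict.get?_insert_of_ne (hne := hpe), PySem.Dict.get?_empty]

-- B computes the same table
theorem pv_B_char (hp : Int) (u : List (List Int)) (x y : Int)
    (hxw : x < pvW u) (hyh : y < pvH u) :
    evalHP_alt hp u x y = (pvG hp u x y (pvW u - 1) (pvH u - 1)).isSome := by
  rw [evalHP_alt_eq]
  have hfin := pv_outer hp u x y (by omega) (pvH u - y).toNat y
    (PySem.Dict.empty.insert (y, x) hp) le_rfl le_rfl (pv_init hp u x y)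
  rw [PySem.Dict.contains_eq_isSome_get?]
  rw [hfin.1 (pvH u - 1, pvW u - 1) (Or.inr ⟨by omega, by omega, by omega, by omega, by omega⟩)]

theorem evalHP_far (u : List (List Int)) (v x y : Int)
    (h1 : pvW u ≤ x + 1) (h2 : pvH u ≤ y + 1) (hnt : ¬(x = pvW u - 1 ∧ y = pvH u - 1)) :
    evalHP v u x y = false := by
  rw [evalHP, if_neg (by simpa [pvW, pvH] using hnt)]
  simp only [pvW, pvH] at h1 h2
  rw [dif_neg (by omega), dif_neg (by omega)]
  simp

theorem alt_far (hp : Int) (u : List (List Int)) (x y : Int)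
    (hc : pvH u ≤ y ∨ (y = pvH u - 1 ∧ pvW u ≤ x)) : evalHP_alt hp u x y = false := by
  rw [evalHP_alt_eq]
  rcases hc with hc | ⟨hc1, hc2⟩
  · rw [show PySem.List.pyRange y (pvH u) 1 = [] from PySem.List.pyRange_one_eq_nil (by omega),
      List.foldl_nil, PySem.Dict.contains_insert]
    simp only [PySem.Dict.contains_empty, Bool.or_false, beq_eq_false_iff_ne, ne_eq,
      Prod.mk.injEq, not_and]
    intro hh
    omega
  · have hH : pvH u = y + 1 := by omega
    rw [hH, PySem.List.pyRange_one_singleton, List.foldl_cons, List.foldl_nil,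
      show PySem.List.pyRange x (pvW u) 1 = [] from PySem.List.pyRange_one_eq_nil (by omega),
      List.foldl_nil, PySem.Dict.contains_insert]
    simp only [PySem.Dict.contains_empty, Bool.or_false, beq_eq_false_iff_ne, ne_eq,
      Prod.mk.injEq, not_and]
    intro hh
    omega

-- ===== VERDICT (by name: the statement is the Claim_ definition above) =====
theorem evalHP_spec : Claim_equal_evalHP := by
  intro hp u x y _hdom hpre
  obtain ⟨hne, hrows, hcase⟩ := hpre
  have hw : ((u.headD []).length : Int) = pvW u := by
    cases u with
    | nil => simp at hne
    | cons r rs => simp [pvW, PySem.List.pyGetD_zero]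
  have hh : ((u.length : Int)) = pvH u := rfl
  rw [hw, hh] at hcase
  unfold Spec_evalHP
  rcases hcase with ⟨hx1, hx2, hy1, hy2⟩ | ⟨h1, h2⟩ | ⟨h1, h2⟩
  · rw [pv_A_char hp u x y hx2 hy2, pv_B_char hp u x y hx2 hy2]
  · rw [evalHP_far u hp x y (by omega) (by omega) (by rintro ⟨-, hb⟩; omega),
      alt_far hp u x y (Or.inl h1)]
  · rw [evalHP_far u hp x y (by omega) (by omega) (by rintro ⟨ha, -⟩; omega),
      alt_far hp u x y (Or.inr ⟨h1, h2⟩)]
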